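-- pv_equiv track=rewrite | github.com/caeciliaskov/bioinformatics-algorithms | Project_5.py | min_value_coordinate
-- ===== SOURCE A (Python) =====
-- def min_value_coordinate(matrix):
-- 	lowest_value = None
-- 	lowest_value_coordinate = None
--
-- 	for i, row in enumerate(matrix):
-- 		for j, value in enumerate(row):
-- 			if i != j:
-- 				if lowest_value == None or value < lowest_value:
-- 					lowest_value = value
-- 					lowest_value_coordinate = (i, j)
--
-- 	return lowest_value_coordinate
-- ===== SOURCE B (Python) =====
-- def min_value_coordinate(matrix):
-- 	# Two-pass: build a table of per-row best off-diagonal candidates, then reduce it.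
-- 	table = []
-- 	for i, row in enumerate(matrix):
-- 		cands = [(v, i, j) for j, v in enumerate(row) if j != i]
-- 		if cands:
-- 			table.append(min(cands, key=lambda t: t[0]))
-- 	if not table:
-- 		return None
-- 	_, i, j = min(table, key=lambda t: t[0])
-- 	return (i, j)
-- ===== Notes on version B (the rewrite author's own statement) =====
-- stated objective: alternative
-- what changed: A's single fused running-min scan over all off-diagonal cells is replaced by two passes: build a table of per-row best off-diagonal candidates, then reduce the table to the overall first minimum.
-- outside the precondition, e.g. on min_value_coordinate([[7]]): A returns None, B returns None; on min_value_coordinate([]): A returns None, B returns None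
import Mathlib
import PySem

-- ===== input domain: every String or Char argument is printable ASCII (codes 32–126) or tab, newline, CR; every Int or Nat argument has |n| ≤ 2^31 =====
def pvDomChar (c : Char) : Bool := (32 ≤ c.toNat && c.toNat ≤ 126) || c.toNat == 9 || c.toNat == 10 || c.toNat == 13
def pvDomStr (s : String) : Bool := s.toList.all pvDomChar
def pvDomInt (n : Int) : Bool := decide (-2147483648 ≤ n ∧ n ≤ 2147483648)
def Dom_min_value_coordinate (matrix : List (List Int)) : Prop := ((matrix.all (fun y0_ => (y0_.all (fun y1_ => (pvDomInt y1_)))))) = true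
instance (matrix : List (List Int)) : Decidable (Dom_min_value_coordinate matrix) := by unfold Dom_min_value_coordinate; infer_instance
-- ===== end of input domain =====

-- B splits A's fused running-min scan into two passes: a table of per-row best
-- off-diagonal candidates, then a reduction of that table (objective: alternative
-- decomposition, same cost). Equivalence of return values is proved on Pre_.

-- ===== PORT A =====
-- A's running state: some (lowest_value, lowest_value_coordinate); none = both still None.
def pvStepA (i : Int) (acc : Option (Int × Int × Int)) (p : Int × Int) : Option (Int × Int × Int) :=
  if i ≠ p.1 then
    match acc with
    | none => some (p.2, i, p.1)
    | some m => if p.2 < m.1 then some (p.2, i, p.1) else some m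
  else acc

def min_value_coordinate (matrix : List (List Int)) : Int × Int :=
  let st := (PySem.List.enumerate matrix 0).foldl
    (fun acc rp => (PySem.List.enumerate rp.2 0).foldl (pvStepA rp.1) acc) none
  match st with
  | some m => m.2
  | none => (0, 0)  -- Python A returns None here; excluded by Pre_

-- ===== PORT B =====
-- cands = [(v, i, j) for j, v in enumerate(row) if j != i]
def pvCands (rp : Int × List Int) : List (Int × Int × Int) :=
  ((PySem.List.enumerate rp.2 0).filter (fun jp => jp.1 ≠ rp.1)).map
    (fun jp => (jp.2, rp.1, jp.1))

def min_value_coordinate_alt (matrix : List (List Int)) : Int × Int :=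
  let table := (PySem.List.enumerate matrix 0).foldl
    (fun tbl rp =>
      match PySem.List.min? (pvCands rp) (fun t => t.1) with
      | some m => tbl ++ [m]
      | none => tbl) []
  match PySem.List.min? table (fun t => t.1) with
  | some m => (m.2.1, m.2.2)
  | none => (0, 0)  -- Python B returns None here; excluded by Pre_

-- ===== PRECONDITION & SPEC =====
-- Pre_ excludes matrices with no off-diagonal entry (e.g. [], [[7]]): there both
-- Pythons return None, which is not a value of the declared pair type.
def Pre_min_value_coordinate (matrix : List (List Int)) : Prop :=
  ∃ i < matrix.length, ∃ j < (matrix.getD i []).length, j ≠ i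
instance (matrix : List (List Int)) : Decidable (Pre_min_value_coordinate matrix) := by
  unfold Pre_min_value_coordinate; infer_instance

def pvWitness_min_value_coordinate : List (List Int) := [[5, 2], [1, 9]]

def Spec_min_value_coordinate (matrix : List (List Int)) (out : Int × Int) : Prop := out = min_value_coordinate_alt matrix
instance (matrix : List (List Int)) (out : Int × Int) : Decidable (Spec_min_value_coordinate matrix out) := by unfold Spec_min_value_coordinate; infer_instance

-- ===== CLAIM (what is proved, stated in full; the proofs are below) =====
def Claim_equal_min_value_coordinate : Prop := ∀ (matrix : List (List Int)), Dom_min_value_coordinate matrix → Pre_min_value_coordinate matrix → Spec_min_value_coordinate matrix (min_value_coordinate matrix)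

-- ===== LEMMAS AND PROOFS =====

-- the running-min step on candidate triples, keyed on the value (first component)
def pvT (acc : Option (Int × Int × Int)) (x : Int × Int × Int) : Option (Int × Int × Int) :=
  match acc with
  | none => some x
  | some m => if x.1 < m.1 then some x else some m

theorem pv_min?_eq_foldl (xs : List (Int × Int × Int)) :
    PySem.List.min? xs (fun t => t.1) = xs.foldl pvT none := by
  simp only [PySem.List.min?]
  apply PySem.List.foldl_congr_mem
  intro acc x _
  cases acc <;> rfl

-- combine an accumulator with the (optional) best of a later block; ties keep the accumulator
def pvC (acc : Option (Int × Int × Int)) (ob : Option (Int × Int × Int)) : Option (Int × Int × Int) :=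
  match ob with
  | none => acc
  | some m => pvT acc m

-- the inner row loop of A is the candidate fold
theorem pv_innerA (rp : Int × List Int) (acc : Option (Int × Int × Int)) :
    (PySem.List.enumerate rp.2 0).foldl (pvStepA rp.1) acc
      = (pvCands rp).foldl pvT acc := by
  have h1 : (PySem.List.enumerate rp.2 0).foldl (pvStepA rp.1) acc
      = (PySem.List.enumerate rp.2 0).foldl
          (fun a jp => if jp.1 ≠ rp.1 then pvT a (jp.2, rp.1, jp.1) else a) acc := by
    apply PySem.List.foldl_congr_mem
    intro a jp _
    simp only [pvStepA, pvT]
    by_cases h : rp.1 = jp.1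
    · simp [h]
    · simp [h, Ne.symm h]
  rw [h1, PySem.List.foldl_ite_eq_foldl_filter (fun (jp : Int × Int) => jp.1 ≠ rp.1)
        (fun a jp => pvT a (jp.2, rp.1, jp.1)) (PySem.List.enumerate rp.2) acc]
  rw [pvCands, List.foldl_map]

-- a running fold from any accumulator is the combine of that accumulator with the block's best
theorem pv_foldl_pvT (xs : List (Int × Int × Int)) (acc : Option (Int × Int × Int)) :
    xs.foldl pvT acc = pvC acc (xs.foldl pvT none) := by
  induction xs generalizing acc with
  | nil => cases acc <;> rfl
  | cons x t ih =>
    simp only [List.foldl_cons]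
    rw [ih (pvT acc x), ih (pvT none x)]
    cases acc with
    | none =>
      cases t.foldl pvT none with
      | none => rfl
      | some m => simp only [pvT, pvC]; split_ifs <;> rfl
    | some a =>
      cases t.foldl pvT none with
      | none => rfl
      | some m =>
        simp only [pvT, pvC]
        by_cases h1 : x.1 < a.1 <;> by_cases h2 : m.1 < x.1 <;>
          simp only [h1, h2, if_true, if_false] <;>
          split_ifs <;> first | rfl | omega

-- folding the combined step over the filterMap of per-row bests
theorem pv_foldl_filterMap (rows : List (Int × List Int)) (acc : Option (Int × Int × Int)) :
    (rows.filterMap (fun rp => PySem.List.min? (pvCands rp) (fun t => t.1))).foldl pvT acc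
      = rows.foldl (fun a rp => pvC a (PySem.List.min? (pvCands rp) (fun t => t.1))) acc := by
  induction rows generalizing acc with
  | nil => rfl
  | cons r t ih =>
    cases h : PySem.List.min? (pvCands r) (fun t => t.1) with
    | none => simp [h, ih, pvC]
    | some m => simp [h, ih, pvC]

-- B's table-building loop builds exactly that filterMap
theorem pv_table (rows : List (Int × List Int)) (tbl : List (Int × Int × Int)) :
    rows.foldl
      (fun tbl rp =>
        match PySem.List.min? (pvCands rp) (fun t => t.1) with
        | some m => tbl ++ [m]
        | none => tbl) tbl
      = tbl ++ rows.filterMap (fun rp => PySem.List.min? (pvCands rp) (fun t => t.1)) := by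
  induction rows generalizing tbl with
  | nil => simp
  | cons r t ih =>
    cases h : PySem.List.min? (pvCands r) (fun t => t.1) with
    | none => simp [h, ih]
    | some m => simp [h, ih]

-- the two programs reach the same final state
theorem pv_states (matrix : List (List Int)) :
    (PySem.List.enumerate matrix 0).foldl
        (fun acc rp => (PySem.List.enumerate rp.2 0).foldl (pvStepA rp.1) acc) none
      = PySem.List.min?
          ((PySem.List.enumerate matrix 0).foldl
            (fun tbl rp =>
              match PySem.List.min? (pvCands rp) (fun t => t.1) with
              | some m => tbl ++ [m]
              | none => tbl) [])
          (fun t => t.1) := by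
  rw [pv_table, List.nil_append, pv_min?_eq_foldl, pv_foldl_filterMap]
  apply PySem.List.foldl_congr_mem
  intro acc rp _
  rw [pv_innerA rp acc, pv_foldl_pvT, pv_min?_eq_foldl]

-- ===== VERDICT (by name: the statement is the Claim_ definition above) =====
theorem min_value_coordinate_spec : Claim_equal_min_value_coordinate := by
  intro matrix _ _
  unfold Spec_min_value_coordinate min_value_coordinate min_value_coordinate_alt
  rw [pv_states]
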